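-- pv_equiv track=rewrite | github.com/mpusz/mp-units | scripts/systems_reference.py | _split_macro_args
-- ===== SOURCE A (Python) =====
-- from typing import Dict, List, Optional, Set
--
-- def _split_macro_args(args_str: str) -> List[str]:
--     """Split macro arguments respecting nested brackets"""
--     args = []
--     current = []
--     depth = 0
--     angle_depth = 0
--
--     for char in args_str:
--         if char == "(" or char == "{":
--             depth += 1
--             current.append(char)
--         elif char == ")" or char == "}":
--             depth -= 1
--             current.append(char)
--         elif char == "<":
--             angle_depth += 1
--             current.append(char)
--         elif char == ">":
--             angle_depth -= 1
--             current.append(char)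
--         elif char == "," and depth == 0 and angle_depth == 0:
--             args.append("".join(current))
--             current = []
--         else:
--             current.append(char)
--
--     if current:
--         args.append("".join(current))
--
--     return args
-- ===== SOURCE B (Python) =====
-- def _find_top_comma(s):
--     depth = 0
--     angle = 0
--     for i, ch in enumerate(s):
--         if ch == "(" or ch == "{":
--             depth += 1
--         elif ch == ")" or ch == "}":
--             depth -= 1
--         elif ch == "<":
--             angle += 1
--         elif ch == ">":
--             angle -= 1
--         elif ch == "," and depth == 0 and angle == 0:
--             return i
--     return None
--
--
-- def _split_macro_args(args_str):
--     """Split macro arguments respecting nested brackets"""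
--     parts = []
--     rest = args_str
--     while True:
--         i = _find_top_comma(rest)
--         if i is None:
--             if rest:
--                 parts.append(rest)
--             return parts
--         parts.append(rest[:i])
--         rest = rest[i + 1:]
-- ===== Notes on version B (the rewrite author's own statement) =====
-- stated objective: alternative
-- what changed: Replaces the single accumulate-characters-into-current pass by a find-next-top-level-comma helper plus a slicing loop: each iteration locates the first comma at zero round/curly and angle depth and slices the segment out, instead of building every segment character by character.
import Mathlib
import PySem

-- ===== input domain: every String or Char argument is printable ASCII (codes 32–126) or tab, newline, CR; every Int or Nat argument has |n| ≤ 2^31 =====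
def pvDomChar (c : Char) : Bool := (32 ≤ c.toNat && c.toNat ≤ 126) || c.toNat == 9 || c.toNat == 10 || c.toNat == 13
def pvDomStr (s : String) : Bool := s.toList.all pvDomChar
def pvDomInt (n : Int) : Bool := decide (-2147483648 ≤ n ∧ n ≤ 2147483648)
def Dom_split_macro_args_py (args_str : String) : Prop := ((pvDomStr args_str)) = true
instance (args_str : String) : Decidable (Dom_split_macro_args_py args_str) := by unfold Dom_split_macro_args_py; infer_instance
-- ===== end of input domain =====

-- B replaces A's character-by-character segment accumulation by a find-next-top-level-comma
-- helper plus a slicing loop (alternative decomposition, same cost).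

-- ===== PORT A =====
-- one step of A's for-loop over the characters; state = (args, current, depth, angle)
def stepA (st : List String × List Char × Int × Int) (c : Char) :
    List String × List Char × Int × Int :=
  let (args, current, depth, angle) := st
  if c = '(' ∨ c = '{' then (args, current ++ [c], depth + 1, angle)
  else if c = ')' ∨ c = '}' then (args, current ++ [c], depth - 1, angle)
  else if c = '<' then (args, current ++ [c], depth, angle + 1)
  else if c = '>' then (args, current ++ [c], depth, angle - 1)
  else if c = ',' ∧ depth = 0 ∧ angle = 0 then (args ++ [String.mk current], [], depth, angle)
  else (args, current ++ [c], depth, angle)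

def split_macro_args_py (args_str : String) : List String :=
  let st := args_str.toList.foldl stepA ([], [], 0, 0)
  if st.2.1 ≠ [] then st.1 ++ [String.mk st.2.1] else st.1

-- ===== PORT B =====
-- port of _find_top_comma: index (from the scan start) of the first comma at
-- round/curly depth 0 and angle depth 0, none if there is no such comma
def findTopComma : List Char → Int → Int → Option Nat
  | [], _, _ => none
  | c :: l, depth, angle =>
    if c = '(' ∨ c = '{' then (findTopComma l (depth + 1) angle).map (· + 1)
    else if c = ')' ∨ c = '}' then (findTopComma l (depth - 1) angle).map (· + 1)
    else if c = '<' then (findTopComma l depth (angle + 1)).map (· + 1)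
    else if c = '>' then (findTopComma l depth (angle - 1)).map (· + 1)
    else if c = ',' ∧ depth = 0 ∧ angle = 0 then some 0
    else (findTopComma l depth angle).map (· + 1)

theorem findTopComma_some_ne_nil {l : List Char} {d a : Int} {i : Nat}
    (h : findTopComma l d a = some i) : l ≠ [] := by
  intro hnil; subst hnil; simp [findTopComma] at h

-- port of B's while-loop; rest[:i] / rest[i+1:] with nonnegative indices are exactly take/drop
def splitLoop (rest : List Char) (parts : List String) : List String :=
  match h : findTopComma rest 0 0 with
  | none => if rest ≠ [] then parts ++ [String.mk rest] else parts
  | some i => splitLoop (rest.drop (i + 1)) (parts ++ [String.mk (rest.take i)])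
termination_by rest.length
decreasing_by
  have hne : rest ≠ [] := findTopComma_some_ne_nil h
  cases rest with
  | nil => exact absurd rfl hne
  | cons c l => simp only [List.length_drop, List.length_cons]; omega

def split_macro_args_py_alt (args_str : String) : List String :=
  splitLoop args_str.toList []

-- ===== PRECONDITION & SPEC =====
def Spec_split_macro_args_py (args_str : String) (out : List String) : Prop := out = split_macro_args_py_alt args_str
instance (args_str : String) (out : List String) : Decidable (Spec_split_macro_args_py args_str out) := by unfold Spec_split_macro_args_py; infer_instance

-- ===== CLAIM (what is proved, stated in full; the proofs are below) =====
def Claim_equal_split_macro_args_py : Prop := ∀ (args_str : String), Dom_split_macro_args_py args_str → Spec_split_macro_args_py args_str (split_macro_args_py args_str)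

-- ===== LEMMAS AND PROOFS =====

-- A's loop-exit step, as a named helper for the proofs
def finishA (st : List String × List Char × Int × Int) : List String :=
  if st.2.1 ≠ [] then st.1 ++ [String.mk st.2.1] else st.1

-- common characterisation: the list of segments of l, given the pending segment cur
-- and the current depth counters
def spec : List Char → List Char → Int → Int → List (List Char)
  | [], cur, _, _ => if cur ≠ [] then [cur] else []
  | c :: l, cur, d, a =>
    if c = '(' ∨ c = '{' then spec l (cur ++ [c]) (d + 1) a
    else if c = ')' ∨ c = '}' then spec l (cur ++ [c]) (d - 1) a
    else if c = '<' then spec l (cur ++ [c]) d (a + 1)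
    else if c = '>' then spec l (cur ++ [c]) d (a - 1)
    else if c = ',' ∧ d = 0 ∧ a = 0 then cur :: spec l [] d a
    else spec l (cur ++ [c]) d a

theorem foldA_spec (l : List Char) : ∀ (args : List String) (cur : List Char) (d a : Int),
    finishA (l.foldl stepA (args, cur, d, a)) = args ++ (spec l cur d a).map String.mk := by
  induction l with
  | nil =>
    intro args cur d a
    simp only [List.foldl_nil, finishA, spec]
    split_ifs <;> simp
  | cons c l ih =>
    intro args cur d a
    simp only [List.foldl_cons, stepA, spec]
    split_ifs with h1 h2 h3 h4 h5
    · exact ih args (cur ++ [c]) (d + 1) a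
    · exact ih args (cur ++ [c]) (d - 1) a
    · exact ih args (cur ++ [c]) d (a + 1)
    · exact ih args (cur ++ [c]) d (a - 1)
    · obtain ⟨-, hd, ha⟩ := h5
      subst hd; subst ha
      rw [ih (args ++ [String.mk cur]) [] 0 0]
      simp
    · exact ih args (cur ++ [c]) d a

theorem spec_of_none : ∀ (l cur : List Char) (d a : Int),
    findTopComma l d a = none →
    spec l cur d a = if cur ++ l = [] then [] else [cur ++ l] := by
  intro l
  induction l with
  | nil => intro cur d a _; simp only [spec, List.append_nil]; split_ifs <;> simp_all
  | cons c l ih =>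
    intro cur d a h
    rw [if_neg (by simp : ¬ cur ++ c :: l = [])]
    simp only [findTopComma] at h
    simp only [spec]
    split_ifs at h ⊢ with h1 h2 h3 h4 h5
    · rw [ih _ _ _ (Option.map_eq_none_iff.mp h)]; simp
    · rw [ih _ _ _ (Option.map_eq_none_iff.mp h)]; simp
    · rw [ih _ _ _ (Option.map_eq_none_iff.mp h)]; simp
    · rw [ih _ _ _ (Option.map_eq_none_iff.mp h)]; simp
    · rw [ih _ _ _ (by simpa using h)]; simp

theorem spec_of_some : ∀ (l : List Char) (i : Nat) (cur : List Char) (d a : Int),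
    findTopComma l d a = some i →
    spec l cur d a = (cur ++ l.take i) :: spec (l.drop (i + 1)) [] 0 0 := by
  intro l
  induction l with
  | nil => intro i cur d a h; simp [findTopComma] at h
  | cons c l ih =>
    intro i cur d a h
    simp only [findTopComma] at h
    simp only [spec]
    split_ifs at h ⊢ with h1 h2 h3 h4 h5
    · obtain ⟨j, hj, rfl⟩ := Option.map_eq_some_iff.mp h
      rw [ih j _ _ _ hj]; simp
    · obtain ⟨j, hj, rfl⟩ := Option.map_eq_some_iff.mp h
      rw [ih j _ _ _ hj]; simp
    · obtain ⟨j, hj, rfl⟩ := Option.map_eq_some_iff.mp h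
      rw [ih j _ _ _ hj]; simp
    · obtain ⟨j, hj, rfl⟩ := Option.map_eq_some_iff.mp h
      rw [ih j _ _ _ hj]; simp
    · obtain ⟨-, hd, ha⟩ := h5
      subst hd; subst ha
      simp only [Option.some_inj] at h
      subst h
      simp
    · obtain ⟨j, hj, rfl⟩ := Option.map_eq_some_iff.mp h
      rw [ih j _ _ _ hj]; simp

theorem splitLoop_none (rest : List Char) (parts : List String)
    (h : findTopComma rest 0 0 = none) :
    splitLoop rest parts = if rest ≠ [] then parts ++ [String.mk rest] else parts := by
  rw [splitLoop]
  split
  · rfl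
  · next i h' => rw [h] at h'; cases h'

theorem splitLoop_some (rest : List Char) (parts : List String) (i : Nat)
    (h : findTopComma rest 0 0 = some i) :
    splitLoop rest parts = splitLoop (rest.drop (i + 1)) (parts ++ [String.mk (rest.take i)]) := by
  rw [splitLoop]
  split
  · next h' => rw [h] at h'; cases h'
  · next j h' =>
    rw [h] at h'
    injection h' with hji
    subst hji
    rfl

theorem splitLoop_spec : ∀ (l : List Char) (parts : List String),
    splitLoop l parts = parts ++ (spec l [] 0 0).map String.mk := by
  intro l parts
  induction l, parts using splitLoop.induct with
  | case1 rest parts h hne =>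
    rw [splitLoop_none _ _ h, spec_of_none _ _ _ _ h]
    simp [hne]
  | case2 rest parts h hne =>
    have : rest = [] := not_not.mp hne
    subst this
    rw [splitLoop_none _ _ h]
    simp [spec]
  | case3 rest parts i h ih =>
    rw [splitLoop_some _ _ _ h, ih, spec_of_some _ _ _ _ _ h]
    simp

-- ===== VERDICT (by name: the statement is the Claim_ definition above) =====
theorem split_macro_args_py_spec : Claim_equal_split_macro_args_py := by
  intro args_str _
  unfold Spec_split_macro_args_py split_macro_args_py split_macro_args_py_alt
  rw [splitLoop_spec]
  have h := foldA_spec args_str.toList [] [] 0 0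
  simp only [finishA] at h
  simpa using h
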